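-- pv_equiv track=rewrite | github.com/DeTensor/detensor | examples/psi-demo.py | whether_find
-- ===== SOURCE A (Python) =====
-- def whether_find(mymatrix):
--     flag = 1
--     n = len(mymatrix)
--     for ii in range(n):
--         i = n-1-ii
--         for j in range(len(mymatrix[i])):
--             if mymatrix[i][j] == 0:
--                 return [0,i,j]
--             elif mymatrix[i][j] == -1:
--                 flag = -1
--     return [flag,-1,-1]
-- ===== SOURCE B (Python) =====
-- def whether_find(mymatrix):
--     best = None
--     for i, row in enumerate(mymatrix):
--         if 0 in row:
--             best = (i, row.index(0))
--     if best is not None: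
--         return [0, best[0], best[1]]
--     flag = -1 if any(-1 in row for row in mymatrix) else 1
--     return [flag, -1, -1]
-- ===== Notes on version B (the rewrite author's own statement) =====
-- stated objective: alternative
-- what changed: Replaces A's reverse-order scan that threads a flag accumulator with a forward enumerate pass that keeps the LAST row containing a zero (via the row membership test and row.index(0)), followed by a separate any()-existence pass for -1 only when no zero exists.
import Mathlib
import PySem

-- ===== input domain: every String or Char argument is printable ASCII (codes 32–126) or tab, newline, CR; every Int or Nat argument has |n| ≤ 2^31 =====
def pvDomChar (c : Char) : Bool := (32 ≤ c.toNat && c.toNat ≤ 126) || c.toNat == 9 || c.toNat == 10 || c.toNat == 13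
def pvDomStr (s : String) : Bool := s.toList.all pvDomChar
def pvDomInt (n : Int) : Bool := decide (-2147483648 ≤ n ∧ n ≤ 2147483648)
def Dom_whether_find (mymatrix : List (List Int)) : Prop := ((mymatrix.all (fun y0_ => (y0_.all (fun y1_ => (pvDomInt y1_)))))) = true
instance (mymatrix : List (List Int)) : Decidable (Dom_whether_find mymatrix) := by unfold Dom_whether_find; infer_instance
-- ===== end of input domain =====

-- B replaces A's reverse scan with threaded flag by a forward enumerate pass that
-- remembers the LAST row containing a zero, plus a separate -1 existence pass; objective: alternative.

-- ===== PORT A =====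
-- inner loop of A: scans one row left to right, threading the flag;
-- returns (some [0,i,j]) on the first zero, else (none, updated flag)
def pvARow (row : List Int) (i j flag : Int) : Option (List Int) × Int :=
  match row with
  | [] => (none, flag)
  | c :: rest =>
    if c = 0 then (some [0, i, j], flag)
    else pvARow rest i (j + 1) (if c = -1 then -1 else flag)

-- outer loop of A: rows are visited in reverse (i = n-1-ii), flag threaded through
def pvAOuter (rows : List (List Int)) (i flag : Int) : List Int :=
  match rows with
  | [] => [flag, -1, -1]
  | row :: rest =>
    match pvARow row i 0 flag with
    | (some res, _) => res
    | (none, flag') => pvAOuter rest (i - 1) flag'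

def whether_find (mymatrix : List (List Int)) : List Int :=
  pvAOuter mymatrix.reverse ((mymatrix.length : Int) - 1) 1

-- ===== PORT B =====
-- B's forward enumerate loop: overwrites best with (i, row.index(0)) whenever 0 ∈ row
def pvBScan (rows : List (List Int)) (i : Int) (best : Option (Int × Int)) : Option (Int × Int) :=
  match rows with
  | [] => best
  | row :: rest =>
    pvBScan rest (i + 1)
      (if (0 : Int) ∈ row then
        match PySem.List.index? row 0 with
        | some j => some (i, (j : Int))
        | none => best           -- unreachable: 0 ∈ row guarantees an index
      else best)

def whether_find_alt (mymatrix : List (List Int)) : List Int :=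
  match pvBScan mymatrix 0 none with
  | some (i, j) => [0, i, j]
  | none =>
    if mymatrix.any (fun row => (-1 : Int) ∈ row) then [-1, -1, -1]
    else [1, -1, -1]

-- ===== PRECONDITION & SPEC =====
def Spec_whether_find (mymatrix : List (List Int)) (out : List Int) : Prop := out = whether_find_alt mymatrix
instance (mymatrix : List (List Int)) (out : List Int) : Decidable (Spec_whether_find mymatrix out) := by unfold Spec_whether_find; infer_instance

-- ===== CLAIM (what is proved, stated in full; the proofs are below) =====
def Claim_equal_whether_find : Prop := ∀ (mymatrix : List (List Int)), Dom_whether_find mymatrix → Spec_whether_find mymatrix (whether_find mymatrix)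

-- ===== LEMMAS AND PROOFS =====

-- proof-only helper: the reverse-priority zero search both programs compute
-- (prefer a zero from a LATER row; within a row, the leftmost zero)
def pvFindRev (rows : List (List Int)) (i : Int) : Option (Int × Int) :=
  match rows with
  | [] => none
  | row :: rest =>
    match pvFindRev rest (i + 1) with
    | some p => some p
    | none => (PySem.List.index? row 0).map (fun j => (i, (j : Int)))

-- proof-only helper: A's zero search as a row-reversed recursion (bridge to pvAOuter)
def pvBRow (row : List Int) (i j : Int) : Option (List Int) :=
  match row with
  | [] => none
  | c :: rest => if c = 0 then some [0, i, j] else pvBRow rest i (j + 1)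

def pvBFind (rows : List (List Int)) (i : Int) : Option (List Int) :=
  match rows with
  | [] => none
  | row :: rest =>
    match pvBRow row i 0 with
    | some r => some r
    | none => pvBFind rest (i - 1)

-- the first component of A's row scan does not depend on the flag and equals the pure row search
theorem pvARow_fst (row : List Int) (i j flag : Int) :
    (pvARow row i j flag).1 = pvBRow row i j := by
  induction row generalizing j flag with
  | nil => rfl
  | cons c rest ih =>
    simp only [pvARow, pvBRow]
    split_ifs <;> simp [ih]

-- when no zero stops the scan, the resulting flag records whether a -1 was seen
theorem pvARow_snd (row : List Int) (i j flag : Int)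
    (h : pvBRow row i j = none) :
    (pvARow row i j flag).2 = if row.any (fun c => c = -1) then -1 else flag := by
  induction row generalizing j flag with
  | nil => rfl
  | cons c rest ih =>
    simp only [pvBRow] at h
    by_cases hc : c = 0
    · simp [hc] at h
    · simp only [pvARow, if_neg hc, List.any_cons]
      rw [ih _ _ (by simpa [hc] using h)]
      by_cases hm : c = -1 <;> simp [hm]

-- the invariant of A's outer loop: result = reverse zero search, else the flag accumulates -1 presence
theorem pvAOuter_eq (rows : List (List Int)) (i flag : Int) :
    pvAOuter rows i flag =
      match pvBFind rows i with
      | some r => r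
      | none =>
        [(if rows.any (fun row => row.any (fun c => c = -1)) then -1 else flag), -1, -1] := by
  induction rows generalizing i flag with
  | nil => rfl
  | cons row rest ih =>
    simp only [pvAOuter, pvBFind]
    rcases hfind : pvBRow row i 0 with _ | r
    · have h1 := pvARow_fst row i 0 flag
      rw [hfind] at h1
      rcases hA : pvARow row i 0 flag with ⟨f, g⟩
      rw [hA] at h1; cases h1
      simp only
      rw [ih]
      have hg : g = if row.any (fun c => c = -1) then -1 else flag := by
        have := pvARow_snd row i 0 flag hfind
        rw [hA] at this; exact this
      rcases h2 : pvBFind rest (i - 1) with _ | r'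
      · simp only [List.any_cons, hg]
        by_cases hr : row.any (fun c => c = -1) = true <;>
          by_cases hr' : rest.any (fun row => row.any (fun c => c = -1)) = true <;>
          simp [hr, hr']
      · simp
    · have h1 := pvARow_fst row i 0 flag
      rw [hfind] at h1
      rcases hA : pvARow row i 0 flag with ⟨f, g⟩
      rw [hA] at h1; cases h1
      simp

-- the pure row search is index? shifted by the starting column
theorem pvBRow_eq_index (row : List Int) (i j : Int) :
    pvBRow row i j = (PySem.List.index? row 0).map (fun k => [0, i, j + (k : Int)]) := by
  induction row generalizing j with
  | nil => simp [pvBRow, PySem.List.index?_eq_idxOf?]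
  | cons c rest ih =>
    by_cases hc : c = 0
    · subst hc
      rw [PySem.List.index?_cons_self]
      simp [pvBRow]
    · rw [PySem.List.index?_cons_of_ne rest hc]
      simp only [pvBRow, if_neg hc, ih]
      cases PySem.List.index? rest 0 with
      | none => simp
      | some k => simp; ring

-- the reverse search distributes over append
theorem pvBFind_append (xs ys : List (List Int)) (i : Int) :
    pvBFind (xs ++ ys) i =
      match pvBFind xs i with
      | some r => some r
      | none => pvBFind ys (i - xs.length) := by
  induction xs generalizing i with
  | nil => simp [pvBFind]
  | cons x xs ih =>
    simp only [List.cons_append, pvBFind]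
    rcases pvBRow x i 0 with _ | r
    · rw [ih]
      have : i - 1 - (xs.length : Int) = i - ((x :: xs).length : Int) := by
        simp; ring
      simp only [this]
    · rfl

-- A's reverse recursion over the reversed list computes pvFindRev
theorem pvBFind_reverse (rows : List (List Int)) (i : Int) :
    pvBFind rows.reverse (i + (rows.length : Int) - 1) =
      (pvFindRev rows i).map (fun p => [0, p.1, p.2]) := by
  induction rows generalizing i with
  | nil => simp [pvBFind, pvFindRev]
  | cons row rest ih =>
    simp only [List.reverse_cons, pvFindRev]
    rw [pvBFind_append]
    have harg : i + ((row :: rest).length : Int) - 1 = (i + 1) + (rest.length : Int) - 1 := by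
      simp; ring
    rw [harg, ih]
    rcases pvFindRev rest (i + 1) with _ | p
    · simp only [Option.map_none]
      have harg2 : (i + 1) + (rest.length : Int) - 1 - ((rest.reverse).length : Int) = i := by
        simp only [List.length_reverse]; ring
      rw [harg2]
      simp only [pvBFind, pvBRow_eq_index]
      rcases PySem.List.index? row 0 with _ | k <;> simp
    · simp

-- B's forward accumulator loop also computes pvFindRev (later rows overwrite earlier ones)
theorem pvBScan_eq (rows : List (List Int)) (i : Int) (best : Option (Int × Int)) :
    pvBScan rows i best =
      match pvFindRev rows i with
      | some p => some p
      | none => best := by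
  induction rows generalizing i best with
  | nil => rfl
  | cons row rest ih =>
    simp only [pvBScan, pvFindRev, ih]
    rcases pvFindRev rest (i + 1) with _ | p
    · rcases hidx : PySem.List.index? row 0 with _ | k
      · have hm : (0 : Int) ∉ row := (PySem.List.index?_eq_none_iff row 0).mp hidx
        simp [hm]
      · have hm : (0 : Int) ∈ row :=
          (PySem.List.index?_isSome_iff row 0).mp (by rw [hidx]; rfl)
        simp [hm]
    · simp

-- ===== VERDICT (by name: the statement is the Claim_ definition above) =====
theorem whether_find_spec : Claim_equal_whether_find := by
  intro m _
  show whether_find m = whether_find_alt m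
  unfold whether_find whether_find_alt
  rw [pvAOuter_eq, pvBScan_eq]
  have h0 : (m.length : Int) - 1 = 0 + (m.length : Int) - 1 := by ring
  rw [h0, pvBFind_reverse]
  rcases pvFindRev m 0 with _ | p
  · simp only [Option.map_none, List.any_reverse]
    have hmem : (m.any (fun row => row.any (fun c => c = -1))) =
        (m.any (fun row => (-1 : Int) ∈ row)) := by
      rw [Bool.eq_iff_iff]
      constructor
      · rintro h
        rw [List.any_eq_true] at h ⊢
        obtain ⟨row, hrow, hr⟩ := h
        rw [List.any_eq_true] at hr
        obtain ⟨c, hc, hc'⟩ := hr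
        exact ⟨row, hrow, by simpa using (by simpa using hc' : c = -1) ▸ hc⟩
      · rintro h
        rw [List.any_eq_true] at h ⊢
        obtain ⟨row, hrow, hr⟩ := h
        exact ⟨row, hrow, by rw [List.any_eq_true]; exact ⟨-1, by simpa using hr, by simp⟩⟩
    rw [hmem]
    split_ifs <;> rfl
  · simp
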